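-- pv_equiv track=rewrite | github.com/rhoitjadhav/competitive-programming-practice | hackerrank/archive/hackfest_2020/Strictly Increasing Sequence.py | whoIsTheWinner
-- ===== SOURCE A (Python) =====
-- def whoIsTheWinner(a):
--     n = len(a)
--     if n == 1: return "First"
--
--     misplaced = 0
--     for i in range(n-1):
--         if a[i] >= a[i+1]:
--             misplaced += 1
--
--     if misplaced == 0:
--         return "First"
--
--     if n % 2 == 0:
--         return "Second"
--     else:
--         return "First"
-- ===== SOURCE B (Python) =====
-- def whoIsTheWinner(a):
--     # strictly increasing  <=>  a equals the sorted list of its distinct elements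
--     if a == sorted(set(a)) or len(a) % 2 == 1:
--         return "First"
--     return "Second"
-- ===== Notes on version B (the rewrite author's own statement) =====
-- stated objective: simpler
-- what changed: Replaces A's index loop counting misplaced adjacent pairs (plus its n==1 special case) by the idiom a == sorted(set(a)) for the strictly-increasing test, collapsing the function to a single two-way conditional.
import Mathlib
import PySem

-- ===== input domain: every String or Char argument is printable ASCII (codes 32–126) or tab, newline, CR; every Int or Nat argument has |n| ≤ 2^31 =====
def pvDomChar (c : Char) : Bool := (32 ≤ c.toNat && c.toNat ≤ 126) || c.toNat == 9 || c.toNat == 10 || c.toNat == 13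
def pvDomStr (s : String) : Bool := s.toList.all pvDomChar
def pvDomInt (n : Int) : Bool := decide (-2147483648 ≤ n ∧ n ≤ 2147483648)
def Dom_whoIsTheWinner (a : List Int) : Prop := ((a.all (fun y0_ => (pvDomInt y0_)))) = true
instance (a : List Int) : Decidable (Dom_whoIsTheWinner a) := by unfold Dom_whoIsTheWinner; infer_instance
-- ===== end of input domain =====

-- B replaces A's index loop over adjacent pairs by the idiom `a == sorted(set(a))` (simpler, not faster).

-- ===== PORT A =====
def whoIsTheWinner (a : List Int) : String :=
  let n : Int := a.length
  if n == 1 then "First"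
  else
    let misplaced : Int :=
      (PySem.List.pyRange 0 (n - 1) 1).foldl
        (fun m i =>
          if PySem.List.pyGetD a i 0 ≥ PySem.List.pyGetD a (i + 1) 0 then m + 1 else m) 0
    if misplaced == 0 then "First"
    else if PySem.Int.mod n 2 == 0 then "Second"
    else "First"

-- ===== PORT B =====
def whoIsTheWinner_alt (a : List Int) : String :=
  if a == PySem.List.sorted (PySem.Set.ofList a) (fun x => x) false
      || PySem.Int.mod (a.length : Int) 2 == 1 then "First"
  else "Second"

-- ===== PRECONDITION & SPEC =====
def Spec_whoIsTheWinner (a : List Int) (out : String) : Prop := out = whoIsTheWinner_alt a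
instance (a : List Int) (out : String) : Decidable (Spec_whoIsTheWinner a out) := by unfold Spec_whoIsTheWinner; infer_instance

-- ===== CLAIM (what is proved, stated in full; the proofs are below) =====
def Claim_equal_whoIsTheWinner : Prop := ∀ (a : List Int), Dom_whoIsTheWinner a → Spec_whoIsTheWinner a (whoIsTheWinner a)

-- ===== LEMMAS AND PROOFS =====

-- counting fold = countP
theorem foldl_count (p : Int → Prop) [DecidablePred p] (l : List Int) (c : Int) :
    l.foldl (fun m i => if p i then m + 1 else m) c = c + (l.countP (fun i => decide (p i)) : Int) := by
  induction l generalizing c with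
  | nil => simp
  | cons x t ih =>
    by_cases hx : p x <;> simp [hx, ih]; ring

-- `a == sorted(set(a))` characterises strict increase
theorem inc_iff (a : List Int) :
    a = PySem.List.sorted (PySem.Set.ofList a) (fun x => x) false ↔ a.Pairwise (· < ·) := by
  constructor
  · intro h
    rw [h]
    exact PySem.List.sorted_ofList_pairwise_lt a
  · intro hp
    have hnd : a.Nodup := hp.imp (fun {x y} h => ne_of_lt h)
    have hperm : a.Perm (PySem.Set.ofList a) := by
      rw [List.perm_ext_iff_of_nodup hnd (PySem.Set.nodup_ofList a)]
      intro x
      exact (PySem.Set.mem_ofList a x).symm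
    exact (PySem.List.sorted_eq_of_perm_of_pairwise_lt (PySem.Set.ofList a) a (fun x => x) hperm hp).symm

-- A's misplaced count is zero iff the list is strictly increasing
theorem misplaced_zero_iff (a : List Int) :
    ((PySem.List.pyRange 0 ((a.length : Int) - 1) 1).foldl
        (fun m i =>
          if PySem.List.pyGetD a i 0 ≥ PySem.List.pyGetD a (i + 1) 0 then m + 1 else m) (0 : Int) = 0)
      ↔ a.Pairwise (· < ·) := by
  rw [foldl_count]
  rw [← List.isChain_iff_pairwise, List.isChain_iff_getElem]
  simp only [zero_add, Int.natCast_eq_zero, List.countP_eq_zero]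
  constructor
  · intro h i hi
    have hmem : ((i : Int)) ∈ PySem.List.pyRange 0 ((a.length : Int) - 1) 1 := by
      rw [PySem.List.mem_pyRange_one]; omega
    have hthis := h _ hmem
    simp only [decide_eq_true_eq, not_le] at hthis
    have h1 : PySem.List.pyGetD a (i : Int) 0 = a[i]'(by omega) := by
      rw [PySem.List.pyGetD_natCast]
      exact List.getD_eq_getElem _ _ (by omega)
    have h2 : PySem.List.pyGetD a ((i : Int) + 1) 0 = a[i+1]'hi := by
      have heq : ((i : Int) + 1) = ((i + 1 : Nat) : Int) := by push_cast; ring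
      rw [heq, PySem.List.pyGetD_natCast]
      exact List.getD_eq_getElem _ _ (by omega)
    rw [h1, h2] at hthis
    exact hthis
  · intro h x hx
    rw [PySem.List.mem_pyRange_one] at hx
    obtain ⟨hx0, hx1⟩ := hx
    obtain ⟨k, rfl⟩ := Int.eq_ofNat_of_zero_le hx0
    have hk : (k : Int) < (a.length : Int) - 1 := by omega
    have hk' : k + 1 < a.length := by omega
    have hthis := h k hk'
    have h1 : PySem.List.pyGetD a (k : Int) 0 = a[k]'(by omega) := by
      rw [PySem.List.pyGetD_natCast]
      exact List.getD_eq_getElem _ _ (by omega)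
    have h2 : PySem.List.pyGetD a ((k : Int) + 1) 0 = a[k+1]'hk' := by
      have heq : ((k : Int) + 1) = ((k + 1 : Nat) : Int) := by push_cast; ring
      rw [heq, PySem.List.pyGetD_natCast]
      exact List.getD_eq_getElem _ _ (by omega)
    simp only [decide_eq_true_eq, h1, h2, not_le]
    exact hthis

-- ===== VERDICT (by name: the statement is the Claim_ definition above) =====
theorem whoIsTheWinner_spec : Claim_equal_whoIsTheWinner := by
  intro a _
  unfold Spec_whoIsTheWinner whoIsTheWinner whoIsTheWinner_alt
  simp only []
  have hmod : PySem.Int.mod (a.length : Int) 2 = (a.length : Int) % 2 := by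
    simp [PySem.Int.mod, Int.fmod_eq_emod]
  simp only [hmod]
  by_cases hinc : a.Pairwise (· < ·)
  · have e1 : (a == PySem.List.sorted (PySem.Set.ofList a) (fun x => x) false) = true :=
      beq_iff_eq.mpr ((inc_iff a).mpr hinc)
    have e2 : ((PySem.List.pyRange 0 ((a.length : Int) - 1) 1).foldl
        (fun m i =>
          if PySem.List.pyGetD a i 0 ≥ PySem.List.pyGetD a (i + 1) 0 then m + 1 else m) (0 : Int) == 0) = true :=
      beq_iff_eq.mpr ((misplaced_zero_iff a).mpr hinc)
    by_cases h1 : ((a.length : Int) == 1) = true <;> simp [h1, e1, e2]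
  · have e1 : (a == PySem.List.sorted (PySem.Set.ofList a) (fun x => x) false) = false :=
      beq_eq_false_iff_ne.mpr (fun h => hinc ((inc_iff a).mp h))
    have e2 : ((PySem.List.pyRange 0 ((a.length : Int) - 1) 1).foldl
        (fun m i =>
          if PySem.List.pyGetD a i 0 ≥ PySem.List.pyGetD a (i + 1) 0 then m + 1 else m) (0 : Int) == 0) = false :=
      beq_eq_false_iff_ne.mpr (fun h => hinc ((misplaced_zero_iff a).mp h))
    have h1 : ((a.length : Int) == 1) = false := by
      apply beq_eq_false_iff_ne.mpr
      intro h
      apply hinc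
      have hl : a.length = 1 := by exact_mod_cast h
      obtain ⟨x, rfl⟩ := List.length_eq_one_iff.mp hl
      simp
    by_cases he : (a.length : Int) % 2 = 0
    · have m0 : (((a.length : Int) % 2) == 0) = true := beq_iff_eq.mpr he
      simp [h1, e1, e2, he]
    · have hodd : (a.length : Int) % 2 = 1 := by omega
      have m1 : (((a.length : Int) % 2) == 1) = true := beq_iff_eq.mpr hodd
      have m0 : (((a.length : Int) % 2) == 0) = false := by rw [hodd]; decide
      simp [h1, e1, e2, m0, m1]
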